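-- pv_equiv track=rewrite | github.com/myothida/14_Algorithm | Python Exercises/student_works/searching1.py | smallest_non_negative
-- ===== SOURCE A (Python) =====
-- def smallest_non_negative(arr):
--     seen = set()
--     result = []
--     for num in arr:
--         seen.add(num)
--         smallest = 0
--         while smallest in seen:
--             smallest += 1
--         result.append(smallest)
--     return result
-- ===== SOURCE B (Python) =====
-- def smallest_non_negative(arr):
--     # The mex after k elements is at most k <= len(arr), so values outside
--     # [0, len(arr)] can never matter: mark presence in a boolean table and
--     # advance a monotone mex pointer instead of rescanning a set from 0.
--     n = len(arr)
--     present = [False] * (n + 1)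
--     result = []
--     mex = 0
--     for num in arr:
--         if 0 <= num <= n:
--             present[num] = True
--         while present[mex]:
--             mex += 1
--         result.append(mex)
--     return result
-- ===== Notes on version B (the rewrite author's own statement) =====
-- stated objective: faster
-- what changed: B replaces A's hash set and restart-from-0 inner scan by a boolean presence table of size len(arr)+1 (values outside [0,len(arr)] are discarded as irrelevant to the mex) and a mex pointer that only moves forward across the whole run.
import Mathlib
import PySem

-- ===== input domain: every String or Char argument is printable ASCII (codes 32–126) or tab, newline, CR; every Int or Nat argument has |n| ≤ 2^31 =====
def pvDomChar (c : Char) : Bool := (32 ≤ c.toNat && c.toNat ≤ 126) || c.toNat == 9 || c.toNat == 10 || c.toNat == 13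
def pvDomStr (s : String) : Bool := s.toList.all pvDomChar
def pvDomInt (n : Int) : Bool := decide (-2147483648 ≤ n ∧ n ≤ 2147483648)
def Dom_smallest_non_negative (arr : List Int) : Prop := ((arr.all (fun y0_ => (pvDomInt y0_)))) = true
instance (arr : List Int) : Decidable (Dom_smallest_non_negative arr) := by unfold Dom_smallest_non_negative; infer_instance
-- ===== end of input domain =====

-- B replaces A's set + restart-from-0 scan by a boolean presence table of size
-- len(arr)+1 and a monotone mex pointer (objective: faster, measured).

-- ===== PORT A =====
-- A's 'while smallest in seen: smallest += 1'
def mexFrom (seen : List Int) (k : Int) : Int :=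
  if h : seen.contains k then mexFrom seen (k + 1) else k
termination_by (seen.filter (fun x => decide (k ≤ x))).length
decreasing_by
  have hk : k ∈ seen := by simpa using h
  have hsub : seen.filter (fun x => decide (k + 1 ≤ x))
      = (seen.filter (fun x => decide (k ≤ x))).filter (fun x => decide (k + 1 ≤ x)) := by
    rw [List.filter_filter]
    apply List.filter_congr
    intro x _
    by_cases h1 : k + 1 ≤ x
    · have h2 : k ≤ x := by omega
      simp [h1, h2]
    · simp [h1]
  rw [hsub]
  apply List.length_filter_lt_length_iff_exists.mpr
  exact ⟨k, by simp [hk], by simp⟩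

def smallest_non_negative (arr : List Int) : List Int :=
  (arr.foldl
    (fun (st : PySem.Set Int × List Int) num =>
      let seen := PySem.Set.add st.1 num
      (seen, st.2 ++ [mexFrom seen 0]))
    (PySem.Set.empty, [])).2

-- ===== PORT B =====
-- B's 'while present[mex]: mex += 1' (the index never leaves the table in a run
-- started from B's initial state; out of range it stops where Python would raise)
def bAdvance (present : List Bool) (k : Nat) : Nat :=
  if h : present.getD k false then bAdvance present (k + 1) else k
termination_by present.length - k
decreasing_by
  have : k < present.length := by
    by_contra hge
    rw [List.getD_eq_default _ _ (by omega)] at h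
    exact absurd h (by simp)
  omega

-- B's for-loop, one step per element
def bGo (n : Nat) : List Int → List Bool → Nat → List Int → List Int
  | [], _, _, acc => acc
  | num :: rest, present, mex, acc =>
      let present' := if 0 ≤ num ∧ num ≤ (n : Int) then present.set num.toNat true else present
      let mex' := bAdvance present' mex
      bGo n rest present' mex' (acc ++ [(mex' : Int)])

def smallest_non_negative_alt (arr : List Int) : List Int :=
  bGo arr.length arr (List.replicate (arr.length + 1) false) 0 []

-- ===== PRECONDITION & SPEC =====
def Spec_smallest_non_negative (arr : List Int) (out : List Int) : Prop := out = smallest_non_negative_alt arr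
instance (arr : List Int) (out : List Int) : Decidable (Spec_smallest_non_negative arr out) := by unfold Spec_smallest_non_negative; infer_instance

-- ===== CLAIM (what is proved, stated in full; the proofs are below) =====
def Claim_equal_smallest_non_negative : Prop := ∀ (arr : List Int), Dom_smallest_non_negative arr → Spec_smallest_non_negative arr (smallest_non_negative arr)

-- ===== LEMMAS AND PROOFS =====

theorem mexFrom_ge (seen : List Int) (k : Int) : k ≤ mexFrom seen k := by
  fun_induction mexFrom seen k with
  | case1 k h ih => omega
  | case2 k h => omega

theorem mexFrom_mem (seen : List Int) (k : Int) :
    ∀ j, k ≤ j → j < mexFrom seen k → seen.contains j := by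
  fun_induction mexFrom seen k with
  | case1 k h ih =>
      intro j hkj hjm
      rcases eq_or_lt_of_le hkj with rfl | hlt
      · exact h
      · exact ih j (by omega) hjm
  | case2 k h =>
      intro j hkj hjm
      omega

theorem mexFrom_stop (seen : List Int) (k : Int) :
    seen.contains (mexFrom seen k) = false := by
  fun_induction mexFrom seen k with
  | case1 k h ih => exact ih
  | case2 k h => simpa using h

theorem bAdvance_eq_of (present : List Bool) (k m : Nat)
    (hkm : k ≤ m)
    (hfill : ∀ j, k ≤ j → j < m → present.getD j false = true)
    (hstop : present.getD m false = false) :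
    bAdvance present k = m := by
  suffices h : ∀ (d : Nat) (k : Nat), k ≤ m → m - k = d →
      (∀ j, k ≤ j → j < m → present.getD j false = true) → bAdvance present k = m by
    exact h (m - k) k hkm rfl hfill
  intro d
  induction d with
  | zero =>
      intro k hk hd _
      have : k = m := by omega
      subst this
      rw [bAdvance, dif_neg (by simpa using hstop)]
  | succ d ih =>
      intro k hk hd hf
      have hlt : k < m := by omega
      rw [bAdvance, dif_pos (by simpa using hf k le_rfl hlt)]
      exact ih (k + 1) (by omega) (by omega) (fun j h1 h2 => hf j (by omega) h2)

-- the actual mex of a growing set is monotone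
theorem mexFrom_mono (seen seen' : List Int)
    (hsub : ∀ x, seen.contains x = true → seen'.contains x = true) :
    mexFrom seen 0 ≤ mexFrom seen' 0 := by
  by_contra hlt
  rw [not_le] at hlt
  have h0 : (0 : Int) ≤ mexFrom seen' 0 := mexFrom_ge _ _
  have h1 := hsub _ (mexFrom_mem seen 0 (mexFrom seen' 0) h0 hlt)
  rw [mexFrom_stop] at h1
  exact absurd h1 (by simp)

-- the 0..mex-1 segment sits injectively inside seen, so mex ≤ |seen|
theorem mexFrom_le_length (seen : List Int) :
    mexFrom seen 0 ≤ (seen.length : Int) := by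
  set M := mexFrom seen 0 with hM
  have h0 : (0 : Int) ≤ M := mexFrom_ge _ _
  have hsub : List.map (fun i : Nat => (i : Int)) (List.range M.toNat) ⊆ seen := by
    intro x hx
    obtain ⟨i, hi, rfl⟩ := List.mem_map.mp hx
    rw [List.mem_range] at hi
    have hc : seen.contains (i : Int) = true :=
      mexFrom_mem seen 0 (i : Int) (Int.natCast_nonneg i) (by omega)
    simpa using hc
  have hndm : (List.map (fun i : Nat => (i : Int)) (List.range M.toNat)).Nodup := by
    refine List.Nodup.map ?_ ?_
    · intro a b hab
      simpa using hab
    · exact List.nodup_range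
  have hle := (List.Nodup.subperm hndm hsub).length_le
  rw [List.length_map, List.length_range] at hle
  omega

theorem length_add_le (s : PySem.Set Int) (x : Int) :
    (PySem.Set.add s x).length ≤ s.length + 1 := by
  rw [PySem.Set.add_eq_ite]
  split <;> simp

-- one step keeps the present-table synchronised with the set
theorem sync_step (n : Nat) (seen : PySem.Set Int) (present : List Bool) (num : Int)
    (hlen : present.length = n + 1)
    (hsync : ∀ j : Nat, j ≤ n → (present.getD j false = true ↔ seen.contains (j : Int) = true)) :
    ∀ j : Nat, j ≤ n →
      ((if 0 ≤ num ∧ num ≤ (n : Int) then present.set num.toNat true else present).getD j false = true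
        ↔ (PySem.Set.add seen num).contains (j : Int) = true) := by
  intro j hj
  have hmem : (PySem.Set.add seen num).contains (j : Int) = true ↔
      ((j : Int) ∈ seen ∨ (j : Int) = num) := by
    simp [PySem.Set.mem_add]
  by_cases hr : 0 ≤ num ∧ num ≤ (n : Int)
  · rw [if_pos hr]
    by_cases hjn : j = num.toNat
    · subst hjn
      have hnum : ((num.toNat : Nat) : Int) = num := by omega
      have hjl : num.toNat < present.length := by omega
      have hset : (present.set num.toNat true).getD num.toNat false = true := by
        simp [List.getD_eq_getElem?_getD, hjl]
      rw [hset, hmem, hnum]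
      simp
    · have hset : (present.set num.toNat true).getD j false = present.getD j false := by
        simp [List.getD_eq_getElem?_getD, Ne.symm hjn]
      rw [hset, hsync j hj, hmem]
      have : ¬ ((j : Int) = num) := by omega
      simp [this]
  · rw [if_neg hr]
    rw [hsync j hj, hmem]
    have : ¬ ((j : Int) = num) := by
      intro h
      apply hr
      omega
    simp [this]

-- main invariant-carrying induction: A's fold and B's recursion produce the same list
theorem fold_agree (n : Nat) :
    ∀ (rest : List Int) (seen : PySem.Set Int) (present : List Bool) (mex : Nat) (acc : List Int),
      present.length = n + 1 →
      seen.length + rest.length ≤ n →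
      (∀ j : Nat, j ≤ n → (present.getD j false = true ↔ seen.contains (j : Int) = true)) →
      ((mex : Int) = mexFrom seen 0) →
      (rest.foldl
        (fun (st : PySem.Set Int × List Int) num =>
          let seen := PySem.Set.add st.1 num
          (seen, st.2 ++ [mexFrom seen 0]))
        (seen, acc)).2
      = bGo n rest present mex acc := by
  intro rest
  induction rest with
  | nil => intro seen present mex acc _ _ _ _; rfl
  | cons num rest ih =>
      intro seen present mex acc hlen hcard hsync hmex
      rw [List.foldl_cons, bGo]
      dsimp only
      set seen' := PySem.Set.add seen num with hseen'
      set present' := if 0 ≤ num ∧ num ≤ (n : Int) then present.set num.toNat true else present with hpres'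
      have hlen' : present'.length = n + 1 := by
        rw [hpres']; split <;> simp [hlen]
      have hcard' : seen'.length + rest.length ≤ n := by
        rw [hseen']
        have := length_add_le seen num
        simp only [List.length_cons] at hcard
        omega
      have hsync' := sync_step n seen present num hlen hsync
      rw [← hseen'] at hsync'
      simp only [← hpres'] at hsync'
      set M := mexFrom seen' 0 with hMdef
      have hM0 : (0 : Int) ≤ M := mexFrom_ge _ _
      have hMle : M ≤ (seen'.length : Int) := mexFrom_le_length seen'
      have hMn : M ≤ (n : Int) := by
        simp only [List.length_cons] at hcard
        omega
      have hmono : (mex : Int) ≤ M := by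
        rw [hmex]
        apply mexFrom_mono
        intro x hx
        have : x ∈ seen := by simpa using hx
        have : x ∈ seen' := by
          rw [hseen', PySem.Set.mem_add]; exact Or.inl this
        simpa using this
      have hadv : bAdvance present' mex = M.toNat := by
        apply bAdvance_eq_of
        · omega
        · intro j hj1 hj2
          rw [hsync' j (by omega)]
          exact mexFrom_mem seen' 0 (j : Int) (by positivity) (by omega)
        · have hns : seen'.contains ((M.toNat : Nat) : Int) = false := by
            have hcast : ((M.toNat : Nat) : Int) = M := by omega
            rw [hcast, hMdef]
            exact mexFrom_stop seen' 0
          have h2 := hsync' M.toNat (by omega)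
          rw [hns] at h2
          cases hgb : present'.getD M.toNat false with
          | false => rfl
          | true => exact absurd (h2.mp hgb) (by simp)
      rw [hadv]
      have hcastM : ((M.toNat : Nat) : Int) = M := by omega
      rw [hcastM]
      exact ih seen' present' M.toNat (acc ++ [M]) hlen' hcard'
        hsync' (by omega)

-- ===== VERDICT (by name: the statement is the Claim_ definition above) =====
theorem smallest_non_negative_spec : Claim_equal_smallest_non_negative := by
  intro arr _
  unfold Spec_smallest_non_negative smallest_non_negative smallest_non_negative_alt
  apply fold_agree
  · simp
  · simp [PySem.Set.empty]
  · intro j hj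
    simp [PySem.Set.empty, PySem.Set.contains]
  · rw [mexFrom]
    simp [PySem.Set.empty]
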